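-- pv_equiv track=rewrite | github.com/JulianPeressini/chequeProcessing | listado_cheques.py | check_repetition
-- ===== SOURCE A (Python) =====
-- def check_repetition(chequeList):
--     newList = []
--     for i in range(len(chequeList)):
--         for j in range(i +1, len(chequeList)):
--             if (chequeList[i][3] == chequeList[j][3]):
--                 if (chequeList[i][0] == chequeList[j][0]):
--                     newList.append(chequeList[i])
--                     newList.append(chequeList[j])
--                     return newList
--     return newList
-- ===== SOURCE B (Python) =====
-- def check_repetition(chequeList):
--     first = {}
--     best = None
--     for j, row in enumerate(chequeList):
--         key = (row[3], row[0])
--         seen = first.get(key)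
--         if seen is None:
--             first[key] = (j, row)
--         elif best is None or seen[0] < best[0]:
--             best = (seen[0], j, seen[1], row)
--     if best is None:
--         return []
--     return [best[2], best[3]]
-- ===== Notes on version B (the rewrite author's own statement) =====
-- stated objective: alternative
-- what changed: Replaces the quadratic all-pairs scan with a single pass that hashes each row's (row[3],row[0]) key to its first occurrence and keeps the index-lexicographically minimal duplicate pair; intended as faster (O(n) vs O(n^2) pair comparisons) but a timing run measured only 1.24x at the largest size, since A exits early on duplicate-heavy random inputs.
-- outside the precondition, e.g. on check_repetition([['x']]): A returns [], B raises IndexError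
import Mathlib
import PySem

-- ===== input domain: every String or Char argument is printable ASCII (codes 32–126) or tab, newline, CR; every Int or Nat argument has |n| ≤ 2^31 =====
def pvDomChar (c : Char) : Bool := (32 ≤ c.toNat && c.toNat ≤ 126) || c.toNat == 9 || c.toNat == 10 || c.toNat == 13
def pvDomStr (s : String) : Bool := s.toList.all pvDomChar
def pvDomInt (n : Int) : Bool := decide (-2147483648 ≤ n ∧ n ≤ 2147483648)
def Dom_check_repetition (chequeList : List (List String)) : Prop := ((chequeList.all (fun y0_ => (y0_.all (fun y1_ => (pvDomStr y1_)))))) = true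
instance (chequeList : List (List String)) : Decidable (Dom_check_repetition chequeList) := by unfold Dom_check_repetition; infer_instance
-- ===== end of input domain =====

-- B replaces A's quadratic all-pairs scan by a single pass with a first-occurrence
-- dictionary keyed by (row[3], row[0]), keeping the minimal index pair (objective: alternative).
-- row[3]/row[0] are ported as getD with default "": exact under Pre_ (every row has ≥ 4 fields).

-- ===== PORT A =====
def pvRow (cl : List (List String)) (i : Int) : List String := PySem.List.pyGetD cl i []

def pvInnerA (cl : List (List String)) (i : Int) : List Int → Option (List (List String))
  | [] => none
  | j :: js =>
    if ((pvRow cl i).getD 3 "" == (pvRow cl j).getD 3 "") then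
      if ((pvRow cl i).getD 0 "" == (pvRow cl j).getD 0 "") then
        some [pvRow cl i, pvRow cl j]
      else pvInnerA cl i js
    else pvInnerA cl i js

def pvOuterA (cl : List (List String)) : List Int → List (List String)
  | [] => []
  | i :: is =>
    match pvInnerA cl i (PySem.List.pyRange (i + 1) cl.length 1) with
    | some res => res
    | none => pvOuterA cl is

def check_repetition (chequeList : List (List String)) : List (List String) :=
  pvOuterA chequeList (PySem.List.pyRange 0 chequeList.length 1)

-- ===== PORT B =====
def pvKey (row : List String) : String × String := (row.getD 3 "", row.getD 0 "")

def pvStepB (st : PySem.Dict (String × String) (Int × List String) ×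
                  Option (Int × Int × List String × List String))
    (p : Int × List String) :
    PySem.Dict (String × String) (Int × List String) ×
      Option (Int × Int × List String × List String) :=
  match st.1.get? (pvKey p.2) with
  | none => (st.1.insert (pvKey p.2) (p.1, p.2), st.2)
  | some s =>
    match st.2 with
    | none => (st.1, some (s.1, p.1, s.2, p.2))
    | some b => if s.1 < b.1 then (st.1, some (s.1, p.1, s.2, p.2)) else (st.1, some b)

def check_repetition_alt (chequeList : List (List String)) : List (List String) :=
  match ((PySem.List.enumerate chequeList 0).foldl pvStepB (PySem.Dict.empty, none)).2 with
  | none => []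
  | some b => [b.2.2.1, b.2.2.2]

-- ===== PRECONDITION & SPEC =====
-- Pre_ excludes lists containing a row with fewer than 4 fields: on those A raises
-- IndexError as soon as the pairwise scan reaches the short row (it returns the empty list only
-- when the scan never reaches it, e.g. on a singleton list), while B raises IndexError on
-- every such list.
def Pre_check_repetition (chequeList : List (List String)) : Prop :=
  ∀ r ∈ chequeList, 4 ≤ r.length
instance (chequeList : List (List String)) : Decidable (Pre_check_repetition chequeList) := by
  unfold Pre_check_repetition; infer_instance

def pvWitness_check_repetition : List (List String) :=
  [["a", "b", "c", "d"], ["e", "f", "g", "d"]]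

def Spec_check_repetition (chequeList : List (List String)) (out : List (List String)) : Prop := out = check_repetition_alt chequeList
instance (chequeList : List (List String)) (out : List (List String)) : Decidable (Spec_check_repetition chequeList out) := by unfold Spec_check_repetition; infer_instance

-- ===== CLAIM (what is proved, stated in full; the proofs are below) =====
def Claim_equal_check_repetition : Prop := ∀ (chequeList : List (List String)), Dom_check_repetition chequeList → Pre_check_repetition chequeList → Spec_check_repetition chequeList (check_repetition chequeList)

-- ===== LEMMAS AND PROOFS =====

-- Common reference: the index-lexicographically first duplicate pair of an enumerated list.
def pvFind (es : List (Int × List String)) (k : String × String) : Option (Int × List String) :=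
  es.find? (fun p => pvKey p.2 == k)

def pvBest : List (Int × List String) → Option (Int × Int × List String × List String)
  | [] => none
  | (i, r) :: es =>
    match pvFind es (pvKey r) with
    | some q => some (i, q.1, r, q.2)
    | none => pvBest es

def pvRender : Option (Int × Int × List String × List String) → List (List String)
  | none => []
  | some b => [b.2.2.1, b.2.2.2]

theorem pvFind_append (es es' : List (Int × List String)) (k : String × String) :
    pvFind (es ++ es') k = (pvFind es k).or (pvFind es' k) := by
  simp [pvFind, List.find?_append]

theorem pvFind_mem {es : List (Int × List String)} {k : String × String}
    {q : Int × List String} (h : pvFind es k = some q) : q ∈ es :=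
  List.mem_of_find?_eq_some h

theorem pvBest_fst_mem {es : List (Int × List String)}
    {b : Int × Int × List String × List String} (h : pvBest es = some b) :
    (b.1, b.2.2.1) ∈ es := by
  induction es with
  | nil => simp [pvBest] at h
  | cons p t ih =>
    obtain ⟨i, r⟩ := p
    rw [pvBest] at h
    cases hf : pvFind t (pvKey r) with
    | some q => rw [hf] at h; injection h with h; subst h; exact List.mem_cons_self
    | none => rw [hf] at h; exact List.mem_cons_of_mem _ (ih h)

theorem pvBest_snoc (es : List (Int × List String)) (m : Int) (r : List String)
    (h : es.Pairwise (fun p q => p.1 < q.1)) :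
    pvBest (es ++ [(m, r)]) =
      match pvFind es (pvKey r), pvBest es with
      | none, b => b
      | some s, none => some (s.1, m, s.2, r)
      | some s, some b => if s.1 < b.1 then some (s.1, m, s.2, r) else some b := by
  induction es with
  | nil => simp [pvBest, pvFind]
  | cons p t ih =>
    obtain ⟨a, ra⟩ := p
    have ha : ∀ q ∈ t, a < q.1 := (List.pairwise_cons.mp h).1
    have ht : t.Pairwise (fun p q => p.1 < q.1) := (List.pairwise_cons.mp h).2
    by_cases hk : pvKey ra = pvKey r
    · -- head has the same key as the appended row
      have hk1 : (pvKey ra == pvKey r) = true := beq_iff_eq.mpr hk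
      have hfr : pvFind ((a, ra) :: t) (pvKey r) = some (a, ra) := by
        simp [pvFind, hk1]
      cases hfa : pvFind t (pvKey ra) with
      | some q =>
        have hq : a < q.1 := ha q (pvFind_mem hfa)
        have hL : pvFind (t ++ [(m, r)]) (pvKey ra) = some q := by
          rw [pvFind_append, hfa]; rfl
        rw [List.cons_append, pvBest, hL, hfr, pvBest, hfa]
        simp
      | none =>
        have hL : pvFind (t ++ [(m, r)]) (pvKey ra) = some (m, r) := by
          rw [pvFind_append, hfa]
          simp [pvFind, beq_iff_eq.mpr hk.symm]
        rw [List.cons_append, pvBest, hL, hfr, pvBest, hfa]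
        cases hbt : pvBest t with
        | none => simp
        | some b =>
          have hab : a < b.1 := ha _ (pvBest_fst_mem hbt)
          simp [hab]
    · -- head key differs from the appended row's key
      have hk1 : (pvKey ra == pvKey r) = false := beq_eq_false_iff_ne.mpr hk
      have hk2 : (pvKey r == pvKey ra) = false := beq_eq_false_iff_ne.mpr (Ne.symm hk)
      have hfr : pvFind ((a, ra) :: t) (pvKey r) = pvFind t (pvKey r) := by
        simp [pvFind, hk1]
      cases hfa : pvFind t (pvKey ra) with
      | some q =>
        have hq : a < q.1 := ha q (pvFind_mem hfa)
        have hL : pvFind (t ++ [(m, r)]) (pvKey ra) = some q := by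
          rw [pvFind_append, hfa]; rfl
        rw [List.cons_append, pvBest, hL, hfr, pvBest, hfa]
        cases hfr2 : pvFind t (pvKey r) with
        | none => simp
        | some s =>
          have hs : a < s.1 := ha _ (pvFind_mem hfr2)
          simp [Int.not_lt.mpr (le_of_lt hs)]
      | none =>
        have hL : pvFind (t ++ [(m, r)]) (pvKey ra) = none := by
          rw [pvFind_append, hfa]
          simp [pvFind, hk2]
        rw [List.cons_append, pvBest, hL, hfr, pvBest, hfa, ih ht]

theorem pvFoldB (todo : List (Int × List String)) (done : List (Int × List String))
    (first : PySem.Dict (String × String) (Int × List String))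
    (best : Option (Int × Int × List String × List String))
    (hf : ∀ k, first.get? k = pvFind done k)
    (hb : best = pvBest done)
    (hp : (done ++ todo).Pairwise (fun p q => p.1 < q.1)) :
    (todo.foldl pvStepB (first, best)).2 = pvBest (done ++ todo) := by
  induction todo generalizing done first best with
  | nil => simpa using hb.symm ▸ rfl
  | cons p rest ih =>
    have hdone : done.Pairwise (fun p q => p.1 < q.1) := (List.pairwise_append.mp hp).1
    have hp' : ((done ++ [p]) ++ rest).Pairwise (fun p q => p.1 < q.1) := by
      simpa [List.append_assoc] using hp
    have hsnoc := pvBest_snoc done p.1 p.2 hdone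
    have hassoc : done ++ p :: rest = (done ++ [p]) ++ rest := by simp
    rw [List.foldl_cons]
    cases hfp : first.get? (pvKey p.2) with
    | none =>
      have hfd : pvFind done (pvKey p.2) = none := (hf _).symm.trans hfp
      have hstep : pvStepB (first, best) p = (first.insert (pvKey p.2) (p.1, p.2), best) := by
        simp [pvStepB, hfp]
      have hf' : ∀ k, (first.insert (pvKey p.2) (p.1, p.2)).get? k = pvFind (done ++ [p]) k := by
        intro k
        rw [pvFind_append]
        rw [PySem.Dict.get?_insert]
        by_cases hk : k = pvKey p.2
        · subst hk
          rw [if_pos rfl, hfd]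
          simp [pvFind]
        · rw [if_neg hk, hf k]
          have : pvFind [p] k = none := by
            simp [pvFind, beq_eq_false_iff_ne.mpr (Ne.symm hk)]
          rw [this, Option.or_none]
      have hb' : best = pvBest (done ++ [p]) := by
        rw [hsnoc, hfd]; exact hb
      rw [hstep, hassoc]
      exact ih (done ++ [p]) _ _ hf' hb' hp'
    | some s =>
      have hfd : pvFind done (pvKey p.2) = some s := (hf _).symm.trans hfp
      have hf' : ∀ k, first.get? k = pvFind (done ++ [p]) k := by
        intro k
        rw [pvFind_append]
        by_cases hk : k = pvKey p.2
        · subst hk; rw [hf, hfd]; rfl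
        · have : pvFind [p] k = none := by
            simp [pvFind, beq_eq_false_iff_ne.mpr (Ne.symm hk)]
          rw [this, Option.or_none, hf]
      cases hbst : best with
      | none =>
        have hstep : pvStepB (first, none) p = (first, some (s.1, p.1, s.2, p.2)) := by
          simp [pvStepB, hfp]
        have hb' : some (s.1, p.1, s.2, p.2) = pvBest (done ++ [p]) := by
          rw [hsnoc, hfd, ← hb, hbst]
        rw [hstep, hassoc]
        exact ih (done ++ [p]) _ _ hf' hb' hp'
      | some b =>
        have hstep : pvStepB (first, some b) p =
            (first, if s.1 < b.1 then some (s.1, p.1, s.2, p.2) else some b) := by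
          simp only [pvStepB, hfp]
          split_ifs <;> rfl
        have hb' : (if s.1 < b.1 then some (s.1, p.1, s.2, p.2) else some b) =
            pvBest (done ++ [p]) := by
          rw [hsnoc, hfd, ← hb, hbst]
        rw [hstep, hassoc]
        exact ih (done ++ [p]) _ _ hf' hb' hp'

theorem altB_eq (cl : List (List String)) :
    check_repetition_alt cl = pvRender (pvBest (PySem.List.enumerate cl 0)) := by
  have h := pvFoldB (PySem.List.enumerate cl 0) [] PySem.Dict.empty none
    (fun k => by simp [pvFind, PySem.Dict.get?_empty]) rfl
    (by simpa using PySem.List.pairwise_lt_enumerate cl 0)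
  rw [List.nil_append] at h
  unfold check_repetition_alt
  rw [h]
  cases pvBest (PySem.List.enumerate cl 0) <;> rfl

theorem innerA_eq (cl : List (List String)) (i : Int) (m : Nat) :
    ∀ j : Nat, j + m = cl.length →
    pvInnerA cl i (PySem.List.pyRange j cl.length 1) =
      (pvFind (PySem.List.enumerate (cl.drop j) j) (pvKey (pvRow cl i))).map
        (fun q => [pvRow cl i, q.2]) := by
  induction m with
  | zero =>
    intro j hj
    have : j = cl.length := by omega
    subst this
    simp [pvInnerA, PySem.List.pyRange, pvFind]
  | succ m ih =>
    intro j hj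
    have hjl : j < cl.length := by omega
    have hlt : (j : Int) < (cl.length : Int) := by exact_mod_cast hjl
    rw [PySem.List.pyRange_one_cons hlt]
    rw [List.drop_eq_getElem_cons hjl, PySem.List.enumerate_cons]
    have hrow : pvRow cl (j : Int) = cl[j] := by
      simp [pvRow, PySem.List.pyGetD_natCast, List.getD, List.getElem?_eq_getElem hjl]
    have hih := ih (j + 1) (by omega)
    rw [pvInnerA, hrow]
    push_cast at hih
    by_cases h3 : (pvRow cl i).getD 3 "" = cl[j].getD 3 ""
    · by_cases h0 : (pvRow cl i).getD 0 "" = cl[j].getD 0 ""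
      · have hk : pvKey cl[j] == pvKey (pvRow cl i) := by
          simp only [pvKey, beq_iff_eq, Prod.mk.injEq]
          exact ⟨h3.symm, h0.symm⟩
        rw [if_pos (beq_iff_eq.mpr h3), if_pos (beq_iff_eq.mpr h0)]
        rw [pvFind]
        simp only [List.find?_cons, hk]
        rfl
      · have hk : (pvKey cl[j] == pvKey (pvRow cl i)) = false := by
          apply beq_eq_false_iff_ne.mpr
          simp only [pvKey, Ne, Prod.mk.injEq, not_and]
          exact fun _ h0' => h0 h0'.symm
        rw [if_pos (beq_iff_eq.mpr h3),
          if_neg (fun h => h0 (beq_iff_eq.mp h))]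
        rw [pvFind]
        simp only [List.find?_cons, hk]
        rw [← pvFind]
        exact hih
    · have hk : (pvKey cl[j] == pvKey (pvRow cl i)) = false := by
        apply beq_eq_false_iff_ne.mpr
        simp only [pvKey, Ne, Prod.mk.injEq, not_and]
        exact fun h3' => absurd h3'.symm h3
      rw [if_neg (fun h => h3 (beq_iff_eq.mp h))]
      rw [pvFind]
      simp only [List.find?_cons, hk]
      rw [← pvFind]
      exact hih

theorem outerA_eq (cl : List (List String)) (m : Nat) :
    ∀ s : Nat, s + m = cl.length →
    pvOuterA cl (PySem.List.pyRange s cl.length 1) =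
      pvRender (pvBest (PySem.List.enumerate (cl.drop s) s)) := by
  induction m with
  | zero =>
    intro s hs
    have : s = cl.length := by omega
    subst this
    simp [pvOuterA, PySem.List.pyRange, pvBest, pvRender]
  | succ m ih =>
    intro s hs
    have hsl : s < cl.length := by omega
    have hlt : (s : Int) < (cl.length : Int) := by exact_mod_cast hsl
    rw [PySem.List.pyRange_one_cons hlt]
    rw [List.drop_eq_getElem_cons hsl, PySem.List.enumerate_cons]
    have hrow : pvRow cl (s : Int) = cl[s] := by
      simp [pvRow, PySem.List.pyGetD_natCast, List.getD, List.getElem?_eq_getElem hsl]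
    have hinner := innerA_eq cl (s : Int) m (s + 1) (by omega)
    rw [pvOuterA]
    have hc : ((s : Int) + 1) = ((s + 1 : Nat) : Int) := by push_cast; ring
    rw [hc, hinner, hrow, pvBest]
    cases hfr : pvFind (PySem.List.enumerate (cl.drop (s + 1)) ((s + 1 : Nat) : Int))
        (pvKey cl[s]) with
    | some q => simp [pvRender]
    | none =>
      simp only [Option.map_none]
      have := ih (s + 1) (by omega)
      rw [this]

theorem aEq (cl : List (List String)) :
    check_repetition cl = pvRender (pvBest (PySem.List.enumerate cl 0)) := by
  have h := outerA_eq cl cl.length 0 (by omega)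
  unfold check_repetition
  simpa using h

-- ===== VERDICT (by name: the statement is the Claim_ definition above) =====
theorem check_repetition_spec : Claim_equal_check_repetition := by
  intro cl _ _
  unfold Spec_check_repetition
  rw [aEq, altB_eq]
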